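-- pv_equiv track=rewrite | github.com/FluxOpenHome/ha-flux-irrigation-addons | flux-irrigation-api/app/routes/weather.py | _map_nws_condition
-- ===== SOURCE A (Python) =====
-- NWS_CONDITION_MAP = {
--     "fair": "sunny",
--     "clear": "sunny",
--     "sunny": "sunny",
--     "hot": "sunny",
--     "mostly sunny": "sunny",
--     "mostly clear": "clear-night",
--     "partly cloudy": "partlycloudy",
--     "partly sunny": "partlycloudy",
--     "mostly cloudy": "cloudy",
--     "cloudy": "cloudy",
--     "overcast": "cloudy",
--     "rain": "rainy",
--     "light rain": "rainy",
--     "rain showers": "rainy",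
--     "showers": "rainy",
--     "drizzle": "rainy",
--     "heavy rain": "pouring",
--     "rain showers likely": "rainy",
--     "showers and thunderstorms": "lightning-rainy",
--     "thunderstorm": "lightning-rainy",
--     "thunderstorms": "lightning-rainy",
--     "severe thunderstorms": "lightning-rainy",
--     "snow": "snowy",
--     "light snow": "snowy",
--     "heavy snow": "snowy",
--     "snow showers": "snowy",
--     "blizzard": "snowy",
--     "flurries": "snowy",
--     "freezing rain": "snowy-rainy",
--     "sleet": "snowy-rainy",
--     "wintry mix": "snowy-rainy",
--     "ice pellets": "hail",
--     "hail": "hail",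
--     "fog": "fog",
--     "mist": "fog",
--     "haze": "fog",
--     "smoke": "fog",
--     "patchy fog": "fog",
--     "windy": "windy",
--     "breezy": "windy",
--     "gusty": "windy",
-- }
--
-- def _map_nws_condition(text_description: str) -> str:
--     """Map NWS textDescription to HA-compatible condition string.
--
--     Uses partial matching — checks if any key phrase appears in the description.
--     Falls back to 'unknown' if no match found.
--     """
--     if not text_description:
--         return "unknown"
--     desc_lower = text_description.lower().strip()
--
--     # Exact match first
--     if desc_lower in NWS_CONDITION_MAP:
--         return NWS_CONDITION_MAP[desc_lower]
--
--     # Partial match — check if description contains a known pattern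
--     # Order matters: check longer/more specific patterns first
--     for key in sorted(NWS_CONDITION_MAP.keys(), key=len, reverse=True):
--         if key in desc_lower:
--             return NWS_CONDITION_MAP[key]
--
--     # Fallback heuristics
--     if "rain" in desc_lower or "shower" in desc_lower:
--         return "rainy"
--     if "snow" in desc_lower:
--         return "snowy"
--     if "thunder" in desc_lower or "storm" in desc_lower:
--         return "lightning-rainy"
--     if "cloud" in desc_lower:
--         return "cloudy"
--     if "sun" in desc_lower or "clear" in desc_lower:
--         return "sunny"
--     if "fog" in desc_lower or "mist" in desc_lower:
--         return "fog"
--     if "wind" in desc_lower: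
--         return "windy"
--
--     return "unknown"
-- ===== SOURCE B (Python) =====
-- NWS_CONDITION_MAP = {
--     "fair": "sunny",
--     "clear": "sunny",
--     "sunny": "sunny",
--     "hot": "sunny",
--     "mostly sunny": "sunny",
--     "mostly clear": "clear-night",
--     "partly cloudy": "partlycloudy",
--     "partly sunny": "partlycloudy",
--     "mostly cloudy": "cloudy",
--     "cloudy": "cloudy",
--     "overcast": "cloudy",
--     "rain": "rainy",
--     "light rain": "rainy",
--     "rain showers": "rainy",
--     "showers": "rainy",
--     "drizzle": "rainy",
--     "heavy rain": "pouring",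
--     "rain showers likely": "rainy",
--     "showers and thunderstorms": "lightning-rainy",
--     "thunderstorm": "lightning-rainy",
--     "thunderstorms": "lightning-rainy",
--     "severe thunderstorms": "lightning-rainy",
--     "snow": "snowy",
--     "light snow": "snowy",
--     "heavy snow": "snowy",
--     "snow showers": "snowy",
--     "blizzard": "snowy",
--     "flurries": "snowy",
--     "freezing rain": "snowy-rainy",
--     "sleet": "snowy-rainy",
--     "wintry mix": "snowy-rainy",
--     "ice pellets": "hail",
--     "hail": "hail",
--     "fog": "fog",
--     "mist": "fog",
--     "haze": "fog",
--     "smoke": "fog",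
--     "patchy fog": "fog",
--     "windy": "windy",
--     "breezy": "windy",
--     "gusty": "windy",
-- }
--
-- _FALLBACKS = [
--     ("rain", "rainy"), ("shower", "rainy"),
--     ("snow", "snowy"),
--     ("thunder", "lightning-rainy"), ("storm", "lightning-rainy"),
--     ("cloud", "cloudy"),
--     ("sun", "sunny"), ("clear", "sunny"),
--     ("fog", "fog"), ("mist", "fog"),
--     ("wind", "windy"),
-- ]
--
-- def _map_nws_condition(text_description: str) -> str:
--     """Map NWS textDescription to HA-compatible condition string.
--
--     One pass over the map in insertion order keeping the longest matching
--     phrase (ties keep the earlier one); no sorting, no separate exact-match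
--     pass.  The fallback token loop runs only if no map phrase occurs.
--     """
--     if not text_description:
--         return "unknown"
--     desc = text_description.lower().strip()
--     best = None  # (phrase length, condition) of the longest matching phrase
--     for phrase, condition in NWS_CONDITION_MAP.items():
--         if phrase in desc and (best is None or len(phrase) > best[0]):
--             best = (len(phrase), condition)
--     if best is not None:
--         return best[1]
--     for token, condition in _FALLBACKS:
--         if token in desc:
--             return condition
--     return "unknown"
-- ===== Notes on version B (the rewrite author's own statement) =====
-- stated objective: alternative
-- what changed: B replaces A's three staged passes (exact dict lookup, a per-call length-descending sort of the keys plus first-match scan, and a fallback if-chain) by a single insertion-order pass over the map that keeps the longest matching phrase (argmax with strict comparison, so ties keep the earlier entry) followed by a small fallback-token loop; the exact-match pass is dropped because the longest-match selection provably returns the same value on exact keys.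
import Mathlib
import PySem

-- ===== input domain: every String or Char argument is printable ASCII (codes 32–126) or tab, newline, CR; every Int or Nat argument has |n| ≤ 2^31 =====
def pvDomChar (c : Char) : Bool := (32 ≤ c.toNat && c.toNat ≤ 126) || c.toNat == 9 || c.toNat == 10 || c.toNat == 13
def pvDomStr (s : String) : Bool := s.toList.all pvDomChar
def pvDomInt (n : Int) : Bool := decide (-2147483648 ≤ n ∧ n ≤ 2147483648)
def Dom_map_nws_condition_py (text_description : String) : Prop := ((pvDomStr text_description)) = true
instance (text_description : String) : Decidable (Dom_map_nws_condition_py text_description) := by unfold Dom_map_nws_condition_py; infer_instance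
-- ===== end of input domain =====

set_option maxRecDepth 40000
set_option maxHeartbeats 2000000


-- B replaces A's per-call sort + exact-lookup + fallback if-chain by a single insertion-order
-- pass keeping the longest matching phrase (argmax; ties keep the earlier entry), then a
-- fallback token loop: a different algorithm of the same cost (no speed claimed).

-- ===== PORT A =====
-- the module constant NWS_CONDITION_MAP (insertion order)
def nwsPairs : List (String × String) := [("fair", "sunny"), ("clear", "sunny"), ("sunny", "sunny"), ("hot", "sunny"), ("mostly sunny", "sunny"), ("mostly clear", "clear-night"), ("partly cloudy", "partlycloudy"), ("partly sunny", "partlycloudy"), ("mostly cloudy", "cloudy"), ("cloudy", "cloudy"), ("overcast", "cloudy"), ("rain", "rainy"), ("light rain", "rainy"), ("rain showers", "rainy"), ("showers", "rainy"), ("drizzle", "rainy"), ("heavy rain", "pouring"), ("rain showers likely", "rainy"), ("showers and thunderstorms", "lightning-rainy"), ("thunderstorm", "lightning-rainy"), ("thunderstorms", "lightning-rainy"), ("severe thunderstorms", "lightning-rainy"), ("snow", "snowy"), ("light snow", "snowy"), ("heavy snow", "snowy"), ("snow showers", "snowy"), ("blizzard", "snowy"), ("flurries", "snowy"), ("freezing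 rain", "snowy-rainy"), ("sleet", "snowy-rainy"), ("wintry mix", "snowy-rainy"), ("ice pellets", "hail"), ("hail", "hail"), ("fog", "fog"), ("mist", "fog"), ("haze", "fog"), ("smoke", "fog"), ("patchy fog", "fog"), ("windy", "windy"), ("breezy", "windy"), ("gusty", "windy")]

def nwsMap : PySem.Dict String String := PySem.Dict.ofList nwsPairs

-- the 'for key in sorted(...)' loop of A: first key contained in d, returning NWS_CONDITION_MAP[key]
def scanKeysA : List String → String → Option String
  | [], _ => none
  | k :: rest, d => if PySem.Str.isIn k d then some (nwsMap.getD k "") else scanKeysA rest d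

-- A's fallback-heuristic if-chain
def fallbackA (d : String) : String :=
  if PySem.Str.isIn "rain" d || PySem.Str.isIn "shower" d then "rainy"
  else if PySem.Str.isIn "snow" d then "snowy"
  else if PySem.Str.isIn "thunder" d || PySem.Str.isIn "storm" d then "lightning-rainy"
  else if PySem.Str.isIn "cloud" d then "cloudy"
  else if PySem.Str.isIn "sun" d || PySem.Str.isIn "clear" d then "sunny"
  else if PySem.Str.isIn "fog" d || PySem.Str.isIn "mist" d then "fog"
  else if PySem.Str.isIn "wind" d then "windy"
  else "unknown"

def map_nws_condition_py (text_description : String) : String :=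
  if text_description = "" then "unknown"
  else
    let d := PySem.Str.strip (PySem.Str.lower text_description)
    match nwsMap.get? d with
    | some v => v
    | none =>
      match scanKeysA (PySem.List.sorted nwsMap.keys (fun k => PySem.Str.len k) true) d with
      | some v => v
      | none => fallbackA d

-- ===== PORT B =====
-- B's module constant _FALLBACKS
def fallPairs : List (String × String) := [("rain", "rainy"), ("shower", "rainy"), ("snow", "snowy"), ("thunder", "lightning-rainy"), ("storm", "lightning-rainy"), ("cloud", "cloudy"), ("sun", "sunny"), ("clear", "sunny"), ("fog", "fog"), ("mist", "fog"), ("wind", "windy")]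

-- B's main loop body: keep the longest matching phrase (strict >, so ties keep the earlier one)
def bbStep (d : String) (best : Option (Int × String)) (p : String × String) : Option (Int × String) :=
  if PySem.Str.isIn p.1 d && (match best with
      | none => true
      | some (bl, _) => decide (bl < PySem.Str.len p.1)) then
    some (PySem.Str.len p.1, p.2)
  else best

-- B's fallback loop: first token contained in d
def scanFall : List (String × String) → String → Option String
  | [], _ => none
  | (p, c) :: rest, d => if PySem.Str.isIn p d then some c else scanFall rest d

def map_nws_condition_py_alt (text_description : String) : String :=
  if text_description = "" then "unknown"
  else
    let d := PySem.Str.strip (PySem.Str.lower text_description)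
    match List.foldl (bbStep d) none nwsPairs with
    | some (_, v) => v
    | none =>
      match scanFall fallPairs d with
      | some c => c
      | none => "unknown"

-- ===== PRECONDITION & SPEC =====
def Spec_map_nws_condition_py (text_description : String) (out : String) : Prop := out = map_nws_condition_py_alt text_description
instance (text_description : String) (out : String) : Decidable (Spec_map_nws_condition_py text_description out) := by unfold Spec_map_nws_condition_py; infer_instance

-- ===== CLAIM (what is proved, stated in full; the proofs are below) =====
def Claim_equal_map_nws_condition_py : Prop := ∀ (text_description : String), Dom_map_nws_condition_py text_description → Spec_map_nws_condition_py text_description (map_nws_condition_py text_description)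

-- ===== LEMMAS AND PROOFS =====

-- literal values of A's sorted tables
def pvKeyLit : List String := ["showers and thunderstorms", "severe thunderstorms", "rain showers likely", "partly cloudy", "mostly cloudy", "thunderstorms", "freezing rain", "mostly sunny", "mostly clear", "partly sunny", "rain showers", "thunderstorm", "snow showers", "ice pellets", "light rain", "heavy rain", "light snow", "heavy snow", "wintry mix", "patchy fog", "overcast", "blizzard", "flurries", "showers", "drizzle", "cloudy", "breezy", "clear", "sunny", "sleet", "smoke", "windy", "gusty", "fair", "rain", "snow", "hail", "mist", "haze", "hot", "fog"]

def pvPairLit : List (String × String) := [("showers and thunderstorms", "lightning-rainy"), ("severe thunderstorms", "lightning-rainy"), ("rain showers likely", "rainy"), ("partly cloudy", "partlycloudy"), ("mostly cloudy", "cloudy"), ("thunderstorms", "lightning-rainy"), ("freezing rain", "snowy-rainy"), ("mostly sunny", "sunny"), ("mostly clear", "clear-night"), ("partly sunny", "partlycloudy"), ("rain showers", "rainy"), ("thunderstorm", "lightning-rainy"), ("snow showers", "snowy"), ("ice pellets", "hail"), ("light rain", "rainy"), ("heavy rain", "pouring"), ("light snow", "snowy"), ("heavy snow", "snowy"), ("wintry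 mix", "snowy-rainy"), ("patchy fog", "fog"), ("overcast", "cloudy"), ("blizzard", "snowy"), ("flurries", "snowy"), ("showers", "rainy"), ("drizzle", "rainy"), ("cloudy", "cloudy"), ("breezy", "windy"), ("clear", "sunny"), ("sunny", "sunny"), ("sleet", "snowy-rainy"), ("smoke", "fog"), ("windy", "windy"), ("gusty", "windy"), ("fair", "sunny"), ("rain", "rainy"), ("snow", "snowy"), ("hail", "hail"), ("mist", "fog"), ("haze", "fog"), ("hot", "sunny"), ("fog", "fog")]

lemma sortedKeys_eval : PySem.List.sorted nwsMap.keys (fun k => PySem.Str.len k) true = pvKeyLit := by decide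

-- the sorted table carries the same keys, with matching values
lemma keylit_map_fst : pvPairLit.map Prod.fst = pvKeyLit := by decide

lemma pairlit_values : ∀ p ∈ pvPairLit, nwsMap.getD p.1 "" = p.2 := by decide

-- A's key scan agrees with a pair scan whose values match the dict lookup
lemma scan_agree (ps : List (String × String)) (d : String)
    (h : ∀ p ∈ ps, nwsMap.getD p.1 "" = p.2) :
    scanKeysA (ps.map Prod.fst) d = scanFall ps d := by
  induction ps with
  | nil => rfl
  | cons p rest ih =>
    obtain ⟨k, c⟩ := p
    simp only [List.map, scanKeysA, scanFall]
    rw [h (k, c) (List.mem_cons_self ..)]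
    split
    · rfl
    · exact ih fun q hq => h q (List.mem_cons_of_mem _ hq)

-- every table pair is both an exact lookup hit and the sorted scan's answer for its own key
lemma all_hit : ∀ p ∈ nwsPairs,
    nwsMap.get? p.1 = some p.2 ∧ scanFall pvPairLit p.1 = some p.2 := by decide

lemma keys_eval : nwsMap.keys = nwsPairs.map Prod.fst := by decide

-- when d is an exact dict key, the longest-first scan already returns its value
lemma exact_hit (d : String) (v : String) (hx : nwsMap.get? d = some v) :
    scanFall pvPairLit d = some v := by
  have hc : nwsMap.contains d = true := by
    rw [PySem.Dict.contains_eq_isSome_get?, hx]; rfl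
  have hmem : d ∈ nwsMap.keys := (PySem.Dict.contains_iff_mem_keys ..).mp hc
  rw [keys_eval] at hmem
  obtain ⟨p, hp, hpd⟩ := List.mem_map.mp hmem
  obtain ⟨hg, hs⟩ := all_hit p hp
  rw [hpd] at hg hs
  rw [hx] at hg
  injection hg with hv
  rw [hs, hv]

-- ======= relating B's argmax fold to the first match of the sorted table =======

-- step lemmas for B's loop body
lemma bbStep_no (d : String) (acc : Option (Int × String)) (p : String × String)
    (h : PySem.Str.isIn p.1 d = false) : bbStep d acc p = acc := by
  unfold bbStep; rw [h]; rfl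

lemma bbStep_none (d : String) (p : String × String)
    (h : PySem.Str.isIn p.1 d = true) :
    bbStep d none p = some (PySem.Str.len p.1, p.2) := by
  unfold bbStep; rw [h]; rfl

lemma bbStep_take (d : String) (b : Int) (v : String) (p : String × String)
    (h : PySem.Str.isIn p.1 d = true) (hlt : b < PySem.Str.len p.1) :
    bbStep d (some (b, v)) p = some (PySem.Str.len p.1, p.2) := by
  unfold bbStep
  have hm : (match (some (b, v) : Option (Int × String)) with
      | none => true
      | some (bl, _) => decide (bl < PySem.Str.len p.1)) = decide (b < PySem.Str.len p.1) := rfl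
  rw [h, hm, decide_eq_true hlt]; rfl

lemma bbStep_keep (d : String) (b : Int) (v : String) (p : String × String)
    (h : PySem.Str.len p.1 ≤ b) : bbStep d (some (b, v)) p = some (b, v) := by
  unfold bbStep
  have hm : (match (some (b, v) : Option (Int × String)) with
      | none => true
      | some (bl, _) => decide (bl < PySem.Str.len p.1)) = decide (b < PySem.Str.len p.1) := rfl
  rw [hm, decide_eq_false (not_lt.mpr h), Bool.and_false]; rfl

-- non-matching pairs are skipped by the fold
lemma foldl_skip (d : String) (ps : List (String × String)) (acc : Option (Int × String)) :
    List.foldl (bbStep d) acc ps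
      = List.foldl (bbStep d) acc (ps.filter (fun p => PySem.Str.isIn p.1 d)) := by
  induction ps generalizing acc with
  | nil => rfl
  | cons p rest ih =>
    cases h : PySem.Str.isIn p.1 d with
    | true =>
      simp only [List.filter_cons, h, if_true, List.foldl]
      exact ih _
    | false =>
      simp only [List.filter_cons, h, Bool.false_eq_true, if_false, List.foldl,
        bbStep_no d acc p h]
      exact ih _

-- once the best reaches length b, pairs no longer than b leave it unchanged
lemma foldl_dom (d : String) (ps : List (String × String)) (b : Int) (v : String)
    (h : ∀ p ∈ ps, PySem.Str.len p.1 ≤ b) :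
    List.foldl (bbStep d) (some (b, v)) ps = some (b, v) := by
  induction ps with
  | nil => rfl
  | cons p rest ih =>
    rw [List.foldl, bbStep_keep d b v p (h p (List.mem_cons_self ..))]
    exact ih fun q hq => h q (List.mem_cons_of_mem _ hq)

-- characterisation of the fold: it returns the first pair attaining the maximal length m
lemma foldl_char (d : String) (M : List (String × String)) (acc : Option (Int × String))
    (m : Int) (q : String × String) (rest : List (String × String))
    (hmatch : ∀ p ∈ M, PySem.Str.isIn p.1 d = true)
    (hbound : ∀ p ∈ M, PySem.Str.len p.1 ≤ m)
    (hacc : acc = none ∨ ∃ b v, acc = some (b, v) ∧ b < m)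
    (hfil : M.filter (fun p => decide (PySem.Str.len p.1 = m)) = q :: rest) :
    List.foldl (bbStep d) acc M = some (m, q.2) := by
  induction M generalizing acc with
  | nil => simp at hfil
  | cons p M' ih =>
    have hpm := hmatch p (List.mem_cons_self ..)
    by_cases hl : PySem.Str.len p.1 = m
    · -- p attains the maximum: it is taken and then dominates
      simp only [List.filter_cons, decide_eq_true hl, if_true, List.cons.injEq] at hfil
      obtain ⟨rfl, -⟩ := hfil
      have hstep : bbStep d acc p = some (m, p.2) := by
        rcases hacc with rfl | ⟨b, v, rfl, hb⟩
        · rw [bbStep_none d p hpm, hl]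
        · rw [bbStep_take d b v p hpm (hl ▸ hb), hl]
      rw [List.foldl, hstep]
      exact foldl_dom d M' m p.2 fun r hr => hbound r (List.mem_cons_of_mem _ hr)
    · -- p is shorter than the maximum: the invariant is preserved
      simp only [List.filter_cons, decide_eq_false hl, Bool.false_eq_true, if_false] at hfil
      have hlt : PySem.Str.len p.1 < m :=
        lt_of_le_of_ne (hbound p (List.mem_cons_self ..)) hl
      rw [List.foldl]
      refine ih (bbStep d acc p)
        (fun r hr => hmatch r (List.mem_cons_of_mem _ hr))
        (fun r hr => hbound r (List.mem_cons_of_mem _ hr)) ?_ hfil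
      rcases hacc with rfl | ⟨b, v, rfl, hb⟩
      · rw [bbStep_none d p hpm]
        exact Or.inr ⟨_, _, rfl, hlt⟩
      · by_cases hbl : b < PySem.Str.len p.1
        · rw [bbStep_take d b v p hpm hbl]
          exact Or.inr ⟨_, _, rfl, hlt⟩
        · rw [bbStep_keep d b v p (not_lt.mp hbl)]
          exact Or.inr ⟨_, _, rfl, hb⟩

-- the first-match scan is the head of the match filter
lemma scan_eq_head (ps : List (String × String)) (d : String) :
    scanFall ps d = ((ps.filter (fun p => PySem.Str.isIn p.1 d)).head?).map Prod.snd := by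
  induction ps with
  | nil => rfl
  | cons p rest ih =>
    obtain ⟨k, c⟩ := p
    cases h : PySem.Str.isIn k d with
    | true =>
      simp only [scanFall, List.filter_cons, h, if_true, List.head?_cons, Option.map_some]
    | false =>
      simp only [scanFall, List.filter_cons, h, Bool.false_eq_true, if_false]
      exact ih

-- concrete facts about the two tables
lemma sorted_pairs_eval :
    PySem.List.sorted nwsPairs (fun p => PySem.Str.len p.1) true = pvPairLit := by decide

lemma nws_perm : nwsPairs.Perm pvPairLit := by
  rw [← sorted_pairs_eval]
  exact (PySem.List.sorted_perm nwsPairs (fun p => PySem.Str.len p.1) true).symm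

lemma pairlit_sorted :
    pvPairLit.Pairwise (fun p q => PySem.Str.len q.1 ≤ PySem.Str.len p.1) := by decide

def pvLens : List Int := [25, 20, 19, 13, 12, 11, 10, 8, 7, 6, 5, 4, 3]

lemma lens_mem : ∀ p ∈ nwsPairs, PySem.Str.len p.1 ∈ pvLens := by decide

-- per-length slices of the two tables coincide (the sort is stable)
lemma len_filter_eq (l : Int) :
    nwsPairs.filter (fun p => decide (PySem.Str.len p.1 = l))
      = pvPairLit.filter (fun p => decide (PySem.Str.len p.1 = l)) := by
  by_cases hl : l ∈ pvLens
  · simp only [pvLens, List.mem_cons, List.not_mem_nil, or_false] at hl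
    rcases hl with rfl|rfl|rfl|rfl|rfl|rfl|rfl|rfl|rfl|rfl|rfl|rfl|rfl <;> decide
  · rw [List.filter_eq_nil_iff.mpr, List.filter_eq_nil_iff.mpr]
    · intro p hp
      have hm : PySem.Str.len p.1 ∈ pvLens := lens_mem p ((nws_perm.mem_iff).mpr hp)
      simp only [decide_eq_true_eq]
      intro hc; exact hl (hc ▸ hm)
    · intro p hp
      have hm := lens_mem p hp
      simp only [decide_eq_true_eq]
      intro hc; exact hl (hc ▸ hm)

-- MAIN: B's insertion-order argmax fold returns exactly the sorted table's first match
lemma fold_eq_scan (d : String) :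
    (List.foldl (bbStep d) none nwsPairs).map Prod.snd = scanFall pvPairLit d := by
  have hMperm : (nwsPairs.filter (fun p => PySem.Str.isIn p.1 d)).Perm
      (pvPairLit.filter (fun p => PySem.Str.isIn p.1 d)) := nws_perm.filter _
  rw [scan_eq_head, foldl_skip]
  cases hM : pvPairLit.filter (fun p => PySem.Str.isIn p.1 d) with
  | nil =>
    have h1 : nwsPairs.filter (fun p => PySem.Str.isIn p.1 d) = [] := by
      rw [hM] at hMperm; exact hMperm.eq_nil
    rw [h1]; rfl
  | cons q rest =>
    -- the maximal matched length is that of the head of the sorted match list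
    have hsortM : (pvPairLit.filter (fun p => PySem.Str.isIn p.1 d)).Pairwise
        (fun p r => PySem.Str.len r.1 ≤ PySem.Str.len p.1) :=
      List.Pairwise.sublist List.filter_sublist pairlit_sorted
    rw [hM] at hsortM hMperm
    have hbound2 : ∀ p ∈ q :: rest, PySem.Str.len p.1 ≤ PySem.Str.len q.1 := by
      intro p hp
      rcases List.mem_cons.mp hp with rfl | hp'
      · exact le_refl _
      · exact (List.pairwise_cons.mp hsortM).1 p hp'
    have hbound1 : ∀ p ∈ nwsPairs.filter (fun p => PySem.Str.isIn p.1 d),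
        PySem.Str.len p.1 ≤ PySem.Str.len q.1 := by
      intro p hp; exact hbound2 p (hMperm.mem_iff.mp hp)
    have hmatch1 : ∀ p ∈ nwsPairs.filter (fun p => PySem.Str.isIn p.1 d),
        PySem.Str.isIn p.1 d = true := by
      intro p hp; exact (List.mem_filter.mp hp).2
    -- the per-length slices of the match lists agree, giving the same first maximal pair
    have hslice : (nwsPairs.filter (fun p => PySem.Str.isIn p.1 d)).filter
          (fun p => decide (PySem.Str.len p.1 = PySem.Str.len q.1))
        = (q :: rest).filter (fun p => decide (PySem.Str.len p.1 = PySem.Str.len q.1)) := by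
      rw [← hM, List.filter_comm, List.filter_comm _ _ pvPairLit, len_filter_eq]
    have hfil : (nwsPairs.filter (fun p => PySem.Str.isIn p.1 d)).filter
          (fun p => decide (PySem.Str.len p.1 = PySem.Str.len q.1))
        = q :: rest.filter (fun p => decide (PySem.Str.len p.1 = PySem.Str.len q.1)) := by
      rw [hslice]
      simp only [List.filter_cons, decide_eq_true_eq, if_pos trivial]

    rw [foldl_char d _ none (PySem.Str.len q.1) q _ hmatch1 hbound1 (Or.inl rfl) hfil]
    rfl

-- B's fallback-token loop computes exactly A's fallback if-chain
lemma fb_agree (d : String) :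
    (match scanFall fallPairs d with | some c => c | none => "unknown") = fallbackA d := by
  unfold fallPairs fallbackA
  cases h1 : PySem.Str.isIn "rain" d with
  | true => simp only [scanFall, h1, Bool.true_or, if_true]
  | false =>
  cases h2 : PySem.Str.isIn "shower" d with
  | true => simp only [scanFall, h1, h2, Bool.false_eq_true, Bool.false_or, if_false, if_true]
  | false =>
  cases h3 : PySem.Str.isIn "snow" d with
  | true => simp only [scanFall, h1, h2, h3, Bool.false_eq_true, Bool.false_or, if_false, if_true]
  | false =>
  cases h4 : PySem.Str.isIn "thunder" d with
  | true => simp only [scanFall, h1, h2, h3, h4, Bool.false_eq_true, Bool.false_or, Bool.true_or, if_false, if_true]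
  | false =>
  cases h5 : PySem.Str.isIn "storm" d with
  | true => simp only [scanFall, h1, h2, h3, h4, h5, Bool.false_eq_true, Bool.false_or, if_false, if_true]
  | false =>
  cases h6 : PySem.Str.isIn "cloud" d with
  | true => simp only [scanFall, h1, h2, h3, h4, h5, h6, Bool.false_eq_true, Bool.false_or, if_false, if_true]
  | false =>
  cases h7 : PySem.Str.isIn "sun" d with
  | true => simp only [scanFall, h1, h2, h3, h4, h5, h6, h7, Bool.false_eq_true, Bool.false_or, Bool.true_or, if_false, if_true]
  | false =>
  cases h8 : PySem.Str.isIn "clear" d with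
  | true => simp only [scanFall, h1, h2, h3, h4, h5, h6, h7, h8, Bool.false_eq_true, Bool.false_or, if_false, if_true]
  | false =>
  cases h9 : PySem.Str.isIn "fog" d with
  | true => simp only [scanFall, h1, h2, h3, h4, h5, h6, h7, h8, h9, Bool.false_eq_true, Bool.false_or, Bool.true_or, if_false, if_true]
  | false =>
  cases h10 : PySem.Str.isIn "mist" d with
  | true => simp only [scanFall, h1, h2, h3, h4, h5, h6, h7, h8, h9, h10, Bool.false_eq_true, Bool.false_or, if_false, if_true]
  | false =>
  cases h11 : PySem.Str.isIn "wind" d with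
  | true => simp only [scanFall, h1, h2, h3, h4, h5, h6, h7, h8, h9, h10, h11, Bool.false_eq_true, Bool.false_or, if_false, if_true]
  | false => simp only [scanFall, h1, h2, h3, h4, h5, h6, h7, h8, h9, h10, h11, Bool.false_eq_true, Bool.false_or, if_false]

lemma core (t : String) : map_nws_condition_py t = map_nws_condition_py_alt t := by
  unfold map_nws_condition_py map_nws_condition_py_alt
  by_cases ht : t = ""
  · simp [ht]
  · simp only [if_neg ht]
    rw [sortedKeys_eval, ← keylit_map_fst,
      scan_agree pvPairLit _ pairlit_values]
    have hf := fold_eq_scan (PySem.Str.strip (PySem.Str.lower t))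
    cases hfold : List.foldl (bbStep (PySem.Str.strip (PySem.Str.lower t))) none nwsPairs with
    | some pr =>
      obtain ⟨m, w⟩ := pr
      rw [hfold] at hf
      simp only [Option.map_some] at hf
      cases hx : nwsMap.get? (PySem.Str.strip (PySem.Str.lower t)) with
      | some v =>
        have hs := exact_hit _ v hx
        rw [hs] at hf
        exact (Option.some.inj hf).symm
      | none => rw [← hf]
    | none =>
      rw [hfold] at hf
      simp only [Option.map_none] at hf
      cases hx : nwsMap.get? (PySem.Str.strip (PySem.Str.lower t)) with
      | some v =>
        rw [exact_hit _ v hx] at hf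
        exact absurd hf (by simp)
      | none =>
        cases hy : scanFall pvPairLit (PySem.Str.strip (PySem.Str.lower t)) with
        | some v2 =>
          rw [hy] at hf
          exact absurd hf (by simp)
        | none =>
          simpa using (fb_agree (PySem.Str.strip (PySem.Str.lower t))).symm

-- ===== VERDICT (by name: the statement is the Claim_ definition above) =====
theorem map_nws_condition_py_spec : Claim_equal_map_nws_condition_py := by
  intro t _
  unfold Spec_map_nws_condition_py
  exact core t
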